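/- GENERATED by tools/from_farm_form.py from prooffarm-gif/accepted/DGifDecompressInput.3/Lemmas.lean (a worked proof of the farm's unit `DGifDecompressInput.3`,
   accepted by the verdict) — do not edit. -/
import Gif.Spec.Units.DGifDecompressInput_3
import Gif.Spec.AllSegs

/-!
  Lemmas for the unit `DGifDecompressInput.3` (segment 3 of `DGifDecompressInput`, 10688EH … 10693DH; dgif_lib.c:1093-1109: the code
  is masked out of the shift register and stored to `*Code`, the shift register and its fill level go down by `RunningBits`, then
  `RunningCode`, `MaxCode1`, `RunningBits` advance).

      di3_Scratch      a window this segment stores to: the stack below the body's `rsp`, `[pv + 20, pv + 32)`,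
                       `[pv + 44, pv + 56)`, `*Code`
      di3_carry        `Body` through a footprint of such windows (the analogue of `DGifDecompressLine.Body.carry_lz`)
      di3_Mid          the private assertion at 1068E2H (`ret11`), behind l.1093-1096
      di3_seg_head     10688EH … 1068E2H: `Tail` → `di3_Mid`
      di3_seg_tail     1068E2H … 106874H (four paths): `di3_Mid` → `Done`
-/

open X86 X86.User Asan ProgX.Base ProgX.Base.Spec Gif.Spec

set_option maxRecDepth 4000
set_option maxHeartbeats 4000000

namespace Gif.Spec.DGifDecompressInput_3

/-- **A window that segment 3 stores to** (`RA` = the entry's `rsp`; the body's stack pointer is `RA − 120`): the stack below the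
body's stack pointer (the return addresses of the check routines), `RunningCode` / `RunningBits` / `MaxCode1` `[pv + 20, pv + 32)`,
`CrntShiftState` / `CrntShiftDWord` `[pv + 44, pv + 56)`, and `*Code`. -/
def di3_Scratch (F : Forest) (e : State) (w : Span) : Prop :=
  ((e.reg .rsp).toNat - 352 ≤ w.lo ∧ w.hi ≤ (e.reg .rsp).toNat - 120) ∨
  (F.pv + 20 ≤ w.lo ∧ w.hi ≤ F.pv + 32) ∨
  (F.pv + 44 ≤ w.lo ∧ w.hi ≤ F.pv + 56) ∨
  ((e.reg .rsi).toNat ≤ w.lo ∧ w.hi ≤ (e.reg .rsi).toNat + 4)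

/-- **Where the private object is**, from `Body`: in the heap's region, its redzone below C00000H. -/
theorem di3_pv_inside {cut : Word} {H : Heap} {rest : List Obj} {frames : List (Nat × FrameLayout)} {F : Forest} {R : Rd}
    {u₀ e : State} {ret : Word} {v : State} (hb : DGifDecompressInput.Body cut H rest frames F R u₀ e ret v) :
    0x800040 ≤ F.pv ∧ F.pv + 24968 ≤ 0xC00000 := by
  have henv : Env H rest frames F R e := hb.pre.1
  have hbase := henv.heap.base
  have hin := hb.ok.owns.inside hb.inv.heap (o := (F.pv, 24936)) (List.mem_cons_of_mem _ List.mem_cons_self)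
  simp only at hin
  omega

/-- **Where `*Code` is**, from `Body`: a stack object of a caller, above the function's return-address slot, below 800000H. -/
theorem di3_code_where {cut : Word} {H : Heap} {rest : List Obj} {frames : List (Nat × FrameLayout)} {F : Forest} {R : Rd}
    {u₀ e : State} {ret : Word} {v : State} (hb : DGifDecompressInput.Body cut H rest frames F R u₀ e ret v) :
    (e.reg .rsp).toNat + 8 ≤ (e.reg .rsi).toNat ∧ (e.reg .rsi).toNat + 4 ≤ 0x800000 := by
  have henv : Env H rest frames F R e := hb.pre.1
  have hout : OutPtr H rest frames F R (e.reg .rsi).toNat 4 := hb.pre.2.2.2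
  exact ⟨hout.above (by omega) henv.heap, hout.low⟩

/-- **`Body` THROUGH THE STORES OF SEGMENT 3.** `v` is a state with `Body`, `s` a later state of the segment: the stack pointer and
`r13`, `r14`, `r15` are what they were, the text is unchanged, the ABI's invariant holds, no shadow byte was written, and every
window written is a `di3_Scratch` window. Then `Body` holds of `s` (at the address `s` is at), and the reader is where it was. -/
theorem di3_carry {cut cut' : Word} {H : Heap} {rest : List Obj} {frames : List (Nat × FrameLayout)} {F : Forest} {R : Rd}
    {u₀ e : State} {ret : Word} {v s : State}
    (hb : DGifDecompressInput.Body cut H rest frames F R u₀ e ret v)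
    (hrip : s.rip = cut') (hrsp : s.reg .rsp = e.reg .rsp - 120)
    (hr13 : s.reg .r13 = v.reg .r13) (hr14 : s.reg .r14 = v.reg .r14) (hr15 : s.reg .r15 = v.reg .r15)
    (hcode : Mem.EqOn ProgX.Base.L.textLo ProgX.Base.L.textHi u₀.mem s.mem) (habi : (conv u₀).inv s)
    {ws : List Span} (hun : ShadowUntouched v.mem s.mem) (hs : Mem.SameExcept ws v.mem s.mem)
    (hws : ∀ w, w ∈ ws → di3_Scratch F e w) :
    DGifDecompressInput.Body cut' H rest frames F R u₀ e ret s ∧ Gif.Spec.rem R s.mem = Gif.Spec.rem R v.mem := by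
  have henv : Env H rest frames F R e := hb.pre.1
  have hout : OutPtr H rest frames F R (e.reg .rsi).toNat 4 := hb.pre.2.2.2
  have hroom : 0x700000 + 352 ≤ (e.reg .rsp).toNat := hb.entry.room
  have htop : (e.reg .rsp).toNat + 8 ≤ 0x800000 := hb.entry.top
  have hok := hb.inv.heap
  have hcur := henv.ctx.cursor_range henv.heap.inv.shadow
  have hplaced := hb.ok.owns.placed hok
  have hpin := di3_pv_inside hb
  have hcw := di3_code_where hb
  have hbase := henv.heap.base
  -- every window is loose
  have hloose : ∀ w, w ∈ ws → Loose H F R w := by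
    intro w hw
    rcases hws w hw with ⟨a, b⟩ | ⟨a, b⟩ | ⟨a, b⟩ | ⟨a, b⟩
    · exact Loose.stack hok (by omega) (by omega) (by omega)
    · exact Loose.pvBody (Or.inl ⟨by omega, by omega⟩)
    · exact Loose.pvBody (Or.inl ⟨by omega, by omega⟩)
    · exact hout.buf.loose.sub (by simp only; omega) (by simp only; omega)
  -- every window is a heap window
  have hwin : ∀ w, w ∈ ws → HeapWin H w := by
    intro w hw
    rcases hws w hw with ⟨a, b⟩ | ⟨a, b⟩ | ⟨a, b⟩ | ⟨a, b⟩
    · apply HeapWin.offHeap hok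
      left
      omega
    · exact HeapWin.pv hok hb.ok.owns (by omega) (by omega)
    · exact HeapWin.pv hok hb.ok.owns (by omega) (by omega)
    · apply HeapWin.offHeap hok
      left
      omega
  -- every window misses the cursor
  have hoffcur : ∀ w, w ∈ ws → w.hi ≤ R.cur ∨ R.cur + 16 ≤ w.lo := by
    intro w hw
    exact (hloose w hw).off_cursor hok hplaced ⟨hcur.1, hcur.2.1⟩
  -- every window misses the saved registers' slots and the return-address slot `[RA − 120, RA + 8)`
  have hslots : ∀ a k : Nat, ((e.reg .rsp).toNat - 120 ≤ a ∧ a + k ≤ (e.reg .rsp).toNat + 8) →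
      ∀ w, w ∈ ws → a + k ≤ w.lo ∨ w.hi ≤ a := by
    intro a k hak w hw
    rcases hws w hw with ⟨p, q⟩ | ⟨p, q⟩ | ⟨p, q⟩ | ⟨p, q⟩
    · omega
    · omega
    · omega
    · omega
  -- the footprint since the entry: every window lies inside one of the contract's
  have hsameE : Mem.SameExcept
      [⟨(e.reg .rsp).toNat - 352, (e.reg .rsp).toNat⟩,
       shadowSpan ((e.reg .rsp).toNat - 120) ((e.reg .rsp).toNat - 56),
       ⟨F.pv + 20, F.pv + 32⟩,
       ⟨F.pv + 44, F.pv + 56⟩,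
       ⟨F.pv + 88, F.pv + 344⟩,
       ⟨(e.reg .rsi).toNat, (e.reg .rsi).toNat + 4⟩,
       ⟨F.gif + 96, F.gif + 100⟩,
       ⟨R.cur, R.cur + 8⟩] e.mem s.mem := by
    apply Mem.SameExcept.step_same' hb.same hs
    intro w hw
    by_cases hempty : w.hi ≤ w.lo
    · left
      exact hempty
    right
    rcases hws w hw with ⟨a, b⟩ | ⟨a, b⟩ | ⟨a, b⟩ | ⟨a, b⟩
    · exact ⟨⟨(e.reg .rsp).toNat - 352, (e.reg .rsp).toNat⟩, by simp only [List.mem_cons, true_or], by simp only; omega,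
        by simp only; omega⟩
    · exact ⟨⟨F.pv + 20, F.pv + 32⟩, by simp only [List.mem_cons, true_or, or_true], by simp only; omega, by simp only; omega⟩
    · exact ⟨⟨F.pv + 44, F.pv + 56⟩, by simp only [List.mem_cons, true_or, or_true], by simp only; omega, by simp only; omega⟩
    · exact ⟨⟨(e.reg .rsi).toNat, (e.reg .rsi).toNat + 4⟩, by simp only [List.mem_cons, true_or, or_true], by simp only; omega,
        by simp only; omega⟩
  have e_rem : Gif.Spec.rem R s.mem = Gif.Spec.rem R v.mem := rem_sameExcept hs (by omega) hoffcur
  refine ⟨⟨hb.entry, hb.pre, hrip, hrsp, hr13.trans hb.r13, hr15.trans hb.r15, hr14.trans hb.r14,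
    ?_, ?_, ?_, ?_, ?_, ?_, ?_, ?_, ?_, ?_, hsameE, ProgX.Base.conv_code_in hcode, habi⟩, e_rem⟩
  · exact slot_sameExcept hs (e.reg .rsp) 8 8 _ (by omega) (by omega) hb.slot_r15 (hslots _ _ (by omega))
  · exact slot_sameExcept hs (e.reg .rsp) 16 8 _ (by omega) (by omega) hb.slot_r14 (hslots _ _ (by omega))
  · exact slot_sameExcept hs (e.reg .rsp) 24 8 _ (by omega) (by omega) hb.slot_r13 (hslots _ _ (by omega))
  · exact slot_sameExcept hs (e.reg .rsp) 32 8 _ (by omega) (by omega) hb.slot_r12 (hslots _ _ (by omega))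
  · exact slot_sameExcept hs (e.reg .rsp) 40 8 _ (by omega) (by omega) hb.slot_rbp (hslots _ _ (by omega))
  · exact slot_sameExcept hs (e.reg .rsp) 48 8 _ (by omega) (by omega) hb.slot_rbx (hslots _ _ (by omega))
  · rw [hs.readLE (e.reg .rsp) 8 (by omega) (hslots _ _ (by omega))]
    exact hb.slot_ra
  · exact hb.inv.sameExcept hun hs hwin
  · exact hb.ok.sameExcept hok ⟨hcur.1, hcur.2.1⟩ hs hloose
  · rw [e_rem]
    exact hb.rem


/-- **`LZOK` behind l.1096**: a footprint that misses `BitsPerPixel` … `StackPtr` `[pv + 8, pv + 44)` keeps the eight clauses of the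
loop's form; the ninth, `CrntShiftState ≤ 11`, is the segment's to show of the value it stored. -/
theorem di3_lz_head {mem mem' : Mem} {pv : Nat} {ws : List Span} (hlz : DGifDecompressInput.LZLoop mem pv)
    (hs : Mem.SameExcept ws mem mem') (hp : pv + 48 < 2 ^ 64) (hd : ∀ w, w ∈ ws → w.hi ≤ pv + 8 ∨ pv + 44 ≤ w.lo)
    (hst : GifFilePrivateType.CrntShiftState mem' pv ≤ 11) : LZOK mem' pv := by
  have e_bpp : GifFilePrivateType.BitsPerPixel mem' pv = GifFilePrivateType.BitsPerPixel mem pv := by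
    simp only [gfield]
    apply hs.rd (pv + 8) 4 (by omega)
    intro w hw
    have := hd w hw
    omega
  have e_clear : GifFilePrivateType.ClearCode mem' pv = GifFilePrivateType.ClearCode mem pv := by
    simp only [gfield]
    apply hs.rd (pv + 12) 4 (by omega)
    intro w hw
    have := hd w hw
    omega
  have e_eof : GifFilePrivateType.EOFCode mem' pv = GifFilePrivateType.EOFCode mem pv := by
    simp only [gfield]
    apply hs.rd (pv + 16) 4 (by omega)
    intro w hw
    have := hd w hw
    omega
  have e_code : GifFilePrivateType.RunningCode mem' pv = GifFilePrivateType.RunningCode mem pv := by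
    simp only [gfield]
    apply hs.rd (pv + 20) 4 (by omega)
    intro w hw
    have := hd w hw
    omega
  have e_bits : GifFilePrivateType.RunningBits mem' pv = GifFilePrivateType.RunningBits mem pv := by
    simp only [gfield]
    apply hs.rd (pv + 24) 4 (by omega)
    intro w hw
    have := hd w hw
    omega
  have e_sp : GifFilePrivateType.StackPtr mem' pv = GifFilePrivateType.StackPtr mem pv := by
    simp only [gfield]
    apply hs.rd (pv + 40) 4 (by omega)
    intro w hw
    have := hd w hw
    omega
  refine ⟨?_, ?_, ?_, ?_, ?_, ?_, ?_, ?_, hst⟩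
  · rw [e_bpp]
    exact hlz.bpp
  · rw [e_clear]
    exact hlz.clear
  · rw [e_eof, e_clear]
    exact hlz.eof
  · rw [e_clear, e_code]
    exact hlz.code_lo
  · rw [e_code]
    exact hlz.code_hi
  · rw [e_bpp, e_bits]
    exact hlz.bits_lo
  · rw [e_bits]
    exact hlz.bits_hi
  · rw [e_sp]
    exact hlz.sp

/-- **`LZOK` behind l.1103-1107**: a footprint inside `[pv + 20, pv + 32)` (RunningCode, RunningBits, MaxCode1) keeps `LZOK` when
`RunningCode` stayed or went up by one from at most 4096, and `RunningBits` stayed or went up by one from at most 11. -/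
theorem di3_lz_tail {mem mem' : Mem} {pv : Nat} {ws : List Span} (hlz : LZOK mem pv)
    (hs : Mem.SameExcept ws mem mem') (hp : pv + 48 < 2 ^ 64) (hd : ∀ w, w ∈ ws → w.hi ≤ pv + 8 ∨ pv + 48 ≤ w.lo ∨
      (pv + 20 ≤ w.lo ∧ w.hi ≤ pv + 32))
    (hrc : GifFilePrivateType.RunningCode mem' pv = GifFilePrivateType.RunningCode mem pv ∨
      (GifFilePrivateType.RunningCode mem' pv = GifFilePrivateType.RunningCode mem pv + 1 ∧
        GifFilePrivateType.RunningCode mem pv ≤ 4096))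
    (hrb : GifFilePrivateType.RunningBits mem' pv = GifFilePrivateType.RunningBits mem pv ∨
      (GifFilePrivateType.RunningBits mem' pv = GifFilePrivateType.RunningBits mem pv + 1 ∧
        GifFilePrivateType.RunningBits mem pv ≤ 11)) : LZOK mem' pv := by
  have e_bpp : GifFilePrivateType.BitsPerPixel mem' pv = GifFilePrivateType.BitsPerPixel mem pv := by
    simp only [gfield]
    apply hs.rd (pv + 8) 4 (by omega)
    intro w hw
    have := hd w hw
    omega
  have e_clear : GifFilePrivateType.ClearCode mem' pv = GifFilePrivateType.ClearCode mem pv := by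
    simp only [gfield]
    apply hs.rd (pv + 12) 4 (by omega)
    intro w hw
    have := hd w hw
    omega
  have e_eof : GifFilePrivateType.EOFCode mem' pv = GifFilePrivateType.EOFCode mem pv := by
    simp only [gfield]
    apply hs.rd (pv + 16) 4 (by omega)
    intro w hw
    have := hd w hw
    omega
  have e_sp : GifFilePrivateType.StackPtr mem' pv = GifFilePrivateType.StackPtr mem pv := by
    simp only [gfield]
    apply hs.rd (pv + 40) 4 (by omega)
    intro w hw
    have := hd w hw
    omega
  have e_st : GifFilePrivateType.CrntShiftState mem' pv = GifFilePrivateType.CrntShiftState mem pv := by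
    simp only [gfield]
    apply hs.rd (pv + 44) 4 (by omega)
    intro w hw
    have := hd w hw
    omega
  have h1 := hlz.code_lo
  have h2 := hlz.code_hi
  have h3 := hlz.bits_lo
  have h4 := hlz.bits_hi
  refine ⟨?_, ?_, ?_, ?_, ?_, ?_, ?_, ?_, ?_⟩
  · rw [e_bpp]
    exact hlz.bpp
  · rw [e_clear]
    exact hlz.clear
  · rw [e_eof, e_clear]
    exact hlz.eof
  · rw [e_clear]
    omega
  · omega
  · rw [e_bpp]
    omega
  · omega
  · rw [e_sp]
    exact hlz.sp
  · rw [e_st]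
    exact hlz.shift

/-- **At 1068E2H (`ret11`, behind l.1093-1096 and the check of l.1103)**: `Body`; `rbx = Private`; `ebp = RunningBits` (reloaded at
1068C1H); the code is stored and is a 12-bit value; the shift register went down by `RunningBits ≥ 1`: `LZOK` holds again and the
function's measure is below the entry's. -/
structure di3_Mid (H : Heap) (rest : List Obj) (frames : List (Nat × FrameLayout)) (F : Forest) (R : Rd) (u₀ e : State)
    (ret : Word) (v : State) : Prop where
  /-- what holds at every cut of the body -/
  body : DGifDecompressInput.Body Gif.L.DGifDecompressInput.ret11 H rest frames F R u₀ e ret v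
  /-- `rbx = Private` -/
  rbx : (v.reg .rbx).toNat = F.pv
  /-- `ebp = Private->RunningBits` -/
  rbp : (v.reg .rbp).toNat = GifFilePrivateType.RunningBits v.mem F.pv
  /-- the LZW field ranges, `CrntShiftState ≤ 11` again -/
  lz : LZOK v.mem F.pv
  /-- `*Code ≤ 4095` -/
  code : rd v.mem (e.reg .rsi).toNat 4 ≤ 4095
  /-- the function's measure went down -/
  mu_lt : mu R v.mem F.pv + 1 ≤ mu R e.mem F.pv

/-- **`lea r12d, [rax + 1]` of a dword loaded from memory**, as the walker leaves the value it then stores (l.1103 `++RunningCode`). -/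
theorem di3_succ32 (n : Nat) (h : n + 1 < 2 ^ 32) :
    (BitVec.setWidth 32 (Word.ofBV (BitVec.ofNat 32 n) + 1).toBitVec).toNat = n + 1 := by
  have e : (Word.ofBV (BitVec.ofNat 32 n)).toNat = n := toNat_ofBV_ofNat32 n (by omega)
  have hl := lea32_succ (Word.ofBV (BitVec.ofNat 32 n)) (by omega)
  rw [toNat_ofBV32, e] at hl
  exact hl

/-- **`add ebp, 1` on a register that holds a small number** (l.1107 `++RunningBits`). -/
theorem di3_inc32 (b : Word) (h : b.toNat + 1 < 2 ^ 32) : (Word.part .w32 b + 1#32).toNat = b.toNat + 1 := by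
  have e1 : (1#32).toNat = 1 := by decide
  have e2 : (2 : Nat) ^ Width.w32.bits = 4294967296 := by decide
  rw [BitVec.toNat_add, toNat_part32, e1, e2]
  omega

/-- **THE EXIT OF SEGMENT 3, ONCE** (all four paths of l.1103-1109 end like this): `v` is the state of `di3_Mid`, `s` the state at
106874H; the stores since `v` went to the stack below the body's stack pointer and into `[pv + 20, pv + 32)`; `RunningCode` and
`RunningBits` stayed or advanced by one (from at most 4096, from at most 11); `eax = 1`. Then `Done` holds of `s`. -/
theorem di3_done {cut : Word} {H : Heap} {rest : List Obj} {frames : List (Nat × FrameLayout)} {F : Forest} {R : Rd}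
    {u₀ e : State} {ret : Word} {v s : State}
    (hb : DGifDecompressInput.Body cut H rest frames F R u₀ e ret v)
    (hlz : LZOK v.mem F.pv) (hcodev : rd v.mem (e.reg .rsi).toNat 4 ≤ 4095) (hmu : mu R v.mem F.pv + 1 ≤ mu R e.mem F.pv)
    (hrip : s.rip = Gif.L.DGifDecompressInput.at_106874) (hrsp : s.reg .rsp = e.reg .rsp - 120)
    (hr13 : s.reg .r13 = v.reg .r13) (hr14 : s.reg .r14 = v.reg .r14) (hr15 : s.reg .r15 = v.reg .r15)
    (hrax : s.reg .rax = Word.ofBV 1#32)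
    (hcode : Mem.EqOn ProgX.Base.L.textLo ProgX.Base.L.textHi u₀.mem s.mem) (habi : (conv u₀).inv s)
    {ws : List Span} (hun : ShadowUntouched v.mem s.mem) (hs : Mem.SameExcept ws v.mem s.mem)
    (hws : ∀ w, w ∈ ws → ((e.reg .rsp).toNat - 352 ≤ w.lo ∧ w.hi ≤ (e.reg .rsp).toNat - 120) ∨
      (F.pv + 20 ≤ w.lo ∧ w.hi ≤ F.pv + 32))
    (hrc : GifFilePrivateType.RunningCode s.mem F.pv = GifFilePrivateType.RunningCode v.mem F.pv ∨
      (GifFilePrivateType.RunningCode s.mem F.pv = GifFilePrivateType.RunningCode v.mem F.pv + 1 ∧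
        GifFilePrivateType.RunningCode v.mem F.pv ≤ 4096))
    (hrb : GifFilePrivateType.RunningBits s.mem F.pv = GifFilePrivateType.RunningBits v.mem F.pv ∨
      (GifFilePrivateType.RunningBits s.mem F.pv = GifFilePrivateType.RunningBits v.mem F.pv + 1 ∧
        GifFilePrivateType.RunningBits v.mem F.pv ≤ 11)) :
    DGifDecompressInput.Done H rest frames F R u₀ e ret s := by
  have henv : Env H rest frames F R e := hb.pre.1
  have hroom : 0x700000 + 352 ≤ (e.reg .rsp).toNat := hb.entry.room
  have htop : (e.reg .rsp).toNat + 8 ≤ 0x800000 := hb.entry.top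
  have hcur := henv.ctx.cursor_range henv.heap.inv.shadow
  have hpin := di3_pv_inside hb
  have hcw := di3_code_where hb
  obtain ⟨k_body, k_rem⟩ := di3_carry (cut' := Gif.L.DGifDecompressInput.at_106874) hb hrip hrsp hr13 hr14 hr15 hcode habi hun hs (by
    intro w hw
    rcases hws w hw with h | h
    · exact Or.inl h
    · exact Or.inr (Or.inl h))
  -- the measure reads the cursor, `Buf[0]` and `CrntShiftState`: none of them was written
  have e_mu : mu R s.mem F.pv = mu R v.mem F.pv := by
    apply mu_sameExcept hs (by omega) (by omega)
    · intro w hw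
      rcases hws w hw with h | h
      · omega
      · omega
    · intro w hw
      rcases hws w hw with h | h
      · omega
      · omega
    · intro w hw
      rcases hws w hw with h | h
      · omega
      · omega
  -- `*Code` was not written
  have e_code : rd s.mem (e.reg .rsi).toNat 4 = rd v.mem (e.reg .rsi).toNat 4 := by
    apply hs.rd _ 4 (by omega)
    intro w hw
    rcases hws w hw with h | h
    · omega
    · omega
  refine ⟨k_body, ?_, ?_, ?_⟩
  · left
    rw [hrax]
    decide
  · apply di3_lz_tail hlz hs (by omega) ?_ hrc hrb
    intro w hw
    rcases hws w hw with h | h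
    · omega
    · omega
  · intro _
    rw [e_code, e_mu]
    exact ⟨hcodev, hmu⟩

/-- **10688EH … 1068E2H (`ret11`)** (dgif_lib.c:1093 `*Code = CrntShiftDWord & CodeMasks[RunningBits]`, l.1095 `CrntShiftDWord >>=
RunningBits`, l.1096 `CrntShiftState -= RunningBits`, and the check of l.1103): `Tail` → `di3_Mid`. The mask is read from the
registered global `CodeMasks` (index `RunningBits ≤ 12`), `*Code` is the caller's stack object (`OutPtr`). -/
theorem di3_seg_head (Lay : Layout) (hLay : Lay.hi = 0x1000000) (μ : Microarch) (hμ : UserX.MicroOK μ) (u₀ : State)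
    (hcode : HasCodeNat Lay u₀ Gif.L.DGifDecompressInput.entry Gif.Code.code_DGifDecompressInput.nat Gif.L.DGifDecompressInput.size)
    (h_load8 : Asan.SmallCheck Lay μ ProgX.Base.WayInv (ProgX.Base.CodeOK u₀) [.rax, .rcx, .rdx] 8 ProgX.Base.L.__asan_load8_noabort.entry)
    (h_load2 : Asan.SmallCheck Lay μ ProgX.Base.WayInv (ProgX.Base.CodeOK u₀) [.rax, .rcx, .rdx] 2 ProgX.Base.L.__asan_load2_noabort.entry)
    (h_store4 : Asan.SmallCheck Lay μ ProgX.Base.WayInv (ProgX.Base.CodeOK u₀) [.rax, .rcx, .rdx] 4 ProgX.Base.L.__asan_store4_noabort.entry)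
    (h_load4 : Asan.SmallCheck Lay μ ProgX.Base.WayInv (ProgX.Base.CodeOK u₀) [.rax, .rcx, .rdx] 4 ProgX.Base.L.__asan_load4_noabort.entry)
    (H : Heap) (rest : List Obj) (frames : List (Nat × FrameLayout)) (F : Forest) (R : Rd) (e : State) (ret : Word)
    (v : State) (hat : DGifDecompressInput.Tail H rest frames F R u₀ e ret v) :
    ReachVia Lay μ ProgX.Base.WayInv v (di3_Mid H rest frames F R u₀ e ret) := by
  obtain ⟨hbody, h_rbx, h_rbp, hlz, hfull, hmu⟩ := hat
  have he := hbody.entry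
  v_entry he
  obtain ⟨henv, hlz0, hrdi, hout⟩ := hbody.pre
  have hpin := di3_pv_inside hbody
  have hcw := di3_code_where hbody
  have hcur := henv.ctx.cursor_range henv.heap.inv.shadow
  have w_rip := hbody.rip
  have c_rsp : v.reg .rsp = e.reg .rsp - 120 := hbody.rsp
  have c_r15 : v.reg .r15 = e.reg .rsi := hbody.r15
  have w_kept : RegsKept [.rsp] v v := RegsKept.refl _ _
  have w_eq : Mem.EqOn ProgX.Base.L.textLo ProgX.Base.L.textHi u₀.mem v.mem := ProgX.Base.conv_code_eqOn hbody.code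
  have hdf := (show abiInv _ from hbody.abi).1
  have hmx := (show abiInv _ from hbody.abi).2
  have hsse := ProgX.Base.sseOK_of_abiInv hbody.abi
  -- THE VALUES THE SEGMENT LOADS, as numbers: RunningBits, CrntShiftState, CrntShiftDWord, CodeMasks[RunningBits]
  obtain ⟨RB, l_rb⟩ : ∃ RB, v.mem.readLE (v.reg .rbx + 24) 4 = RB := ⟨_, rfl⟩
  obtain ⟨S, l_st⟩ : ∃ S, v.mem.readLE (v.reg .rbx + 44) 4 = S := ⟨_, rfl⟩
  obtain ⟨D, l_dw⟩ : ∃ D, v.mem.readLE (v.reg .rbx + 48) 8 = D := ⟨_, rfl⟩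
  obtain ⟨M, l_mask⟩ : ∃ M, v.mem.readLE (v.reg .rbp + v.reg .rbp + 1315712) 2 = M := ⟨_, rfl⟩
  have e_rb : GifFilePrivateType.RunningBits v.mem F.pv = RB := by
    simp only [gfield]
    rw [← rd_eq_readLE v.mem (v.reg .rbx + 24) (F.pv + 24) 4 (by u_omega)]
    exact l_rb
  have e_st : GifFilePrivateType.CrntShiftState v.mem F.pv = S := by
    simp only [gfield]
    rw [← rd_eq_readLE v.mem (v.reg .rbx + 44) (F.pv + 44) 4 (by u_omega)]
    exact l_st
  have hbits_lo := hlz.bits_lo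
  have hbits_hi := hlz.bits_hi
  have hshift := hlz.shift
  rw [e_rb] at h_rbp hfull hbits_lo hbits_hi hshift
  rw [e_st] at hfull hshift
  have hrb31 : (v.reg .rbp).toNat < 2 ^ 31 := by omega
  -- the mask: `CodeMasks[RunningBits] = 2 ^ RunningBits − 1 ≤ 4095` [K1]
  have hM : M ≤ 4095 := by
    have hk := hbody.ok.shape.consts.masks RB hbits_hi
    rw [← rd_eq_readLE v.mem (v.reg .rbp + v.reg .rbp + 1315712) (0x141380 + 2 * RB) 2 (by u_omega), l_mask] at hk
    have hpow : 2 ^ RB ≤ 2 ^ 12 := Nat.pow_le_pow_right (by decide) hbits_hi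
    omega
  u_walk hcode [hμ.vendor, Gif.Spec.sext32_small (v.reg .rbp) hrb31]
    until [Gif.L.DGifDecompressInput.ret11]
    span [ProgX.Base.L.textLo, ProgX.Base.L.textHi] side (v_side)
  case check_106892 =>
    -- l.1093 the load of `Private->CrntShiftDWord`: 8 bytes inside pv
    have hun : ShadowUntouched v.mem s_106892.mem := by v_untouched
    have hl : LiveIn (H.liveObjs ++ rest) (DGifDecompressInput.framesIn frames e) F.pv 24936 :=
      hbody.ok.pv_live.liveIn rest _ (Nat.le_refl _) (Nat.le_refl _)
    exact hl.accSmall hbody.inv.shadow hun _ 8 (by decide) (by u_omega) (by u_omega)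
  case check_1068a6 =>
    -- l.1093 the load of `CodeMasks[RunningBits]`: 2 bytes inside the registered global (26 bytes at 141380H), `RunningBits ≤ 12`
    have hun : ShadowUntouched v.mem s_1068a6.mem := by v_untouched
    have ho : Gif.Globals.CodeMasks.obj ∈ H.liveObjs ++ rest := List.mem_append_right _ henv.ctx.masks
    have h1 : Gif.Globals.CodeMasks.obj.base ≤ (v.reg .rbp + v.reg .rbp + 1315712).toNat := by
      show 0x141380 ≤ _
      u_omega
    have h2 : (v.reg .rbp + v.reg .rbp + 1315712).toNat + 2 ≤ Gif.Globals.CodeMasks.obj.base + Gif.Globals.CodeMasks.obj.size := by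
      show _ ≤ 0x141380 + 26
      u_omega
    exact ProgX.Base.check_small_other hbody.inv.shadow hun ho (by decide) h1 h2
  case check_1068b9 =>
    -- l.1093 the store of `*Code`: the caller's 4-byte stack object
    have hun : ShadowUntouched v.mem s_1068b9.mem := by v_untouched
    have hl : LiveIn (H.liveObjs ++ rest) (DGifDecompressInput.framesIn frames e) (e.reg .rsi).toNat 4 :=
      hout.buf.live.push_frame _
    exact hl.accSmall hbody.inv.shadow hun _ 4 (by decide) (by u_omega) (by u_omega)
  case check_1068dd =>
    -- l.1103 the load of `Private->RunningCode`
    have hun : ShadowUntouched v.mem s_1068dd.mem := by v_untouched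
    have hl : LiveIn (H.liveObjs ++ rest) (DGifDecompressInput.framesIn frames e) F.pv 24936 :=
      hbody.ok.pv_live.liveIn rest _ (Nat.le_refl _) (Nat.le_refl _)
    exact hl.accSmall hbody.inv.shadow hun _ 4 (by decide) (by u_omega) (by u_omega)
  -- 0x1068e2 (ret11)
  -- the three values stored, as numbers: the code (at most the mask), the shifted register (opaque), `CrntShiftState − RunningBits`
  have hS32 : S < 2 ^ 32 := by
    rw [← l_st]
    exact Mem.readLE_lt v.mem _ 4
  have e_sub : (BitVec.ofNat 32 S - BitVec.ofNat 32 RB).toNat = S - RB := toNat_sub32 S RB hfull hS32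
  rw [e_sub] at w_mem
  obtain ⟨cv, hcvdef⟩ : ∃ cv : Nat, cv = (BitVec.zeroExtend 32 (BitVec.ofNat 16 M) &&& Word.part Width.w32 (UInt64.ofNat D)).toNat :=
    ⟨_, rfl⟩
  have hcv : cv ≤ 4095 := by
    have h1 := bv32_and_le_left (BitVec.zeroExtend 32 (BitVec.ofNat 16 M)) (Word.part Width.w32 (UInt64.ofNat D))
    have h2 : (BitVec.zeroExtend 32 (BitVec.ofNat 16 M)).toNat ≤ M := by
      simp only [BitVec.zeroExtend, BitVec.toNat_setWidth, BitVec.toNat_ofNat]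
      have := Nat.mod_le (M % 2 ^ 16) (2 ^ 32)
      have := Nat.mod_le M (2 ^ 16)
      omega
    omega
  rw [← hcvdef] at w_mem
  obtain ⟨dv, hdvdef⟩ : ∃ dv : Nat,
      dv = ((UInt64.ofNat D).toBitVec >>> ((BitVec.setWidth 8 (BitVec.ofNat 32 RB)).toNat % 64)).toNat := ⟨_, rfl⟩
  rw [← hdvdef] at w_mem
  clear hcvdef hdvdef e_sub
  -- what was stored since `v`: the checks' return addresses, `*Code`, `CrntShiftDWord`, `CrntShiftState`
  have hun : ShadowUntouched v.mem s_1068ddr.mem := by v_untouched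
  have hsame : Mem.SameExcept [⟨(e.reg .rsp).toNat - 128, (e.reg .rsp).toNat - 120⟩, ⟨F.pv + 44, F.pv + 56⟩,
      ⟨(e.reg .rsi).toNat, (e.reg .rsi).toNat + 4⟩] v.mem s_1068ddr.mem := by
    rw [w_mem]
    u_same
  have habi : (conv u₀).inv s_1068ddr := by
    refine ProgX.Base.abiInv_of ?_ ?_
    · exact w_df_1068dd
    · rw [w_mxcsr]
      exact hmx
  obtain ⟨k_body, k_rem⟩ := di3_carry (cut' := Gif.L.DGifDecompressInput.ret11) hbody w_rip w_rsp
    (w_kept.get .r13 rfl) (w_kept.get .r14 rfl) (w_kept.get .r15 rfl) w_eq habi hun hsame (by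
      simp only [List.forall_mem_cons, List.not_mem_nil, false_imp_iff, implies_true, and_true, di3_Scratch]
      omega)
  -- the fields read back
  have e_st' : GifFilePrivateType.CrntShiftState s_1068ddr.mem F.pv = S - RB := by
    simp only [gfield]
    rw [w_mem]
    rw [rd_writeLE_disjoint _ _ _ _ _ _ (by u_omega) (by omega) (by u_omega)]
    rw [rd_writeLE_same _ (v.reg .rbx + 44) 4 (S - RB) _ (by u_omega) (by decide)]
    have : (256 : Nat) ^ 4 = 4294967296 := by decide
    omega
  have e_rb' : GifFilePrivateType.RunningBits s_1068ddr.mem F.pv = RB := by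
    rw [← e_rb]
    simp only [gfield]
    apply hsame.rd (F.pv + 24) 4 (by omega)
    simp only [List.forall_mem_cons, List.not_mem_nil, false_imp_iff, implies_true, and_true]
    omega
  have e_buf0 : rd s_1068ddr.mem (F.pv + 88) 1 = rd v.mem (F.pv + 88) 1 := by
    apply hsame.rd (F.pv + 88) 1 (by omega)
    simp only [List.forall_mem_cons, List.not_mem_nil, false_imp_iff, implies_true, and_true]
    omega
  have e_code : rd s_1068ddr.mem (e.reg .rsi).toNat 4 = cv := by
    rw [w_mem]
    rw [rd_writeLE_disjoint _ _ _ _ _ _ (by u_omega) (by omega) (by u_omega)]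
    rw [rd_writeLE_disjoint _ _ _ _ _ _ (by u_omega) (by omega) (by u_omega)]
    rw [rd_writeLE_disjoint _ _ _ _ _ _ (by u_omega) (by omega) (by u_omega)]
    rw [rd_writeLE_same _ (e.reg .rsi) 4 cv _ rfl (by decide)]
    have : (256 : Nat) ^ 4 = 4294967296 := by decide
    omega
  refine ReachVia.done ?_
  exact {
    body := k_body
    rbx := by
      rw [w_kept.get .rbx rfl]
      exact h_rbx
    rbp := by
      rw [w_rbp, e_rb', toNat_ofBV_ofNat32 RB (by omega)]
    lz := by
      apply di3_lz_head hlz hsame (by omega) ?_ ?_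
      · simp only [List.forall_mem_cons, List.not_mem_nil, false_imp_iff, implies_true, and_true]
        omega
      · rw [e_st']
        omega
    code := by
      rw [e_code]
      exact hcv
    mu_lt := by
      have hmu' := hmu
      unfold mu at hmu' ⊢
      rw [e_st', k_rem, e_buf0]
      rw [e_st] at hmu'
      omega
  }

/-- **1068E2H (`ret11`) … 106874H, four paths** (dgif_lib.c:1103-1109): `RunningCode < LZ_MAX_CODE + 2` (4097; else nothing is
stored); `++RunningCode`; `RunningCode > MaxCode1 && RunningBits < LZ_BITS` (else nothing more); `MaxCode1 <<= 1`, `++RunningBits`;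
`eax = 1` on every path: `di3_Mid` → `Done` (each exit by `di3_done`). -/
theorem di3_seg_tail (Lay : Layout) (hLay : Lay.hi = 0x1000000) (μ : Microarch) (hμ : UserX.MicroOK μ) (u₀ : State)
    (hcode : HasCodeNat Lay u₀ Gif.L.DGifDecompressInput.entry Gif.Code.code_DGifDecompressInput.nat Gif.L.DGifDecompressInput.size)
    (h_load4 : Asan.SmallCheck Lay μ ProgX.Base.WayInv (ProgX.Base.CodeOK u₀) [.rax, .rcx, .rdx] 4 ProgX.Base.L.__asan_load4_noabort.entry)
    (H : Heap) (rest : List Obj) (frames : List (Nat × FrameLayout)) (F : Forest) (R : Rd) (e : State) (ret : Word)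
    (v : State) (hat : di3_Mid H rest frames F R u₀ e ret v) :
    ReachVia Lay μ ProgX.Base.WayInv v (DGifDecompressInput.Done H rest frames F R u₀ e ret) := by
  obtain ⟨hbody, h_rbx, h_rbp, hlz, hcodev, hmu⟩ := hat
  have he := hbody.entry
  v_entry he
  obtain ⟨henv, hlz0, hrdi, hout⟩ := hbody.pre
  have hpin := di3_pv_inside hbody
  have hcw := di3_code_where hbody
  have hcur := henv.ctx.cursor_range henv.heap.inv.shadow
  have w_rip := hbody.rip
  have c_rsp : v.reg .rsp = e.reg .rsp - 120 := hbody.rsp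
  have w_kept : RegsKept [.rsp] v v := RegsKept.refl _ _
  have w_eq : Mem.EqOn ProgX.Base.L.textLo ProgX.Base.L.textHi u₀.mem v.mem := ProgX.Base.conv_code_eqOn hbody.code
  have hdf := (show abiInv _ from hbody.abi).1
  have hmx := (show abiInv _ from hbody.abi).2
  have hsse := ProgX.Base.sseOK_of_abiInv hbody.abi
  -- THE VALUES THE SEGMENT LOADS, as numbers: RunningCode, MaxCode1
  obtain ⟨RC, l_rc⟩ : ∃ RC, v.mem.readLE (v.reg .rbx + 20) 4 = RC := ⟨_, rfl⟩
  obtain ⟨MC, l_mc⟩ : ∃ MC, v.mem.readLE (v.reg .rbx + 28) 4 = MC := ⟨_, rfl⟩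
  obtain ⟨b, c_rbp⟩ : ∃ b, v.reg .rbp = b := ⟨_, rfl⟩
  have e_rc : GifFilePrivateType.RunningCode v.mem F.pv = RC := by
    simp only [gfield]
    rw [← rd_eq_readLE v.mem (v.reg .rbx + 20) (F.pv + 20) 4 (by u_omega)]
    exact l_rc
  have hrc_hi := hlz.code_hi
  have hbits_hi := hlz.bits_hi
  rw [e_rc] at hrc_hi
  rw [c_rbp] at h_rbp
  u_walk hcode [hμ.vendor]
    until [Gif.L.DGifDecompressInput.at_106874]
    span [ProgX.Base.L.textLo, ProgX.Base.L.textHi] side (v_side)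
  case check_1068f8 =>
    -- l.1104 the load of `Private->MaxCode1`
    have hun : ShadowUntouched v.mem s_1068f8.mem := by v_untouched
    have hl : LiveIn (H.liveObjs ++ rest) (DGifDecompressInput.framesIn frames e) F.pv 24936 :=
      hbody.ok.pv_live.liveIn rest _ (Nat.le_refl _) (Nat.le_refl _)
    exact hl.accSmall hbody.inv.shadow hun _ 4 (by decide) (by u_omega) (by u_omega)
  · -- 0x106874 FROM 0x106924: `RunningCode > 4096` (l.1103 false): nothing stored
    have hun : ShadowUntouched v.mem s_106924.mem := by v_untouched
    have hsame : Mem.SameExcept [] v.mem s_106924.mem := by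
      rw [w_mem]
      exact Mem.SameExcept.refl _ _
    have habi : (conv u₀).inv s_106924 := by
      refine ProgX.Base.abiInv_of ?_ ?_
      · rw [w_flags]
        simp only [X86.User.df_setStatus]
        exact hdf
      · rw [w_mxcsr]
        exact hmx
    refine ReachVia.done ?_
    apply di3_done hbody hlz hcodev hmu w_rip w_rsp (w_kept.get .r13 rfl) (w_kept.get .r14 rfl) (w_kept.get .r15 rfl)
      w_rax w_eq habi hun hsame
    · intro w hw
      exact absurd hw List.not_mem_nil
    · left
      rw [w_mem]
    · left
      rw [w_mem]
  · -- 0x106874 FROM 0x10692e: `++RunningCode`, and `RunningCode ≤ MaxCode1` (l.1104 false)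
    have e4096 : (4096#32).toInt = 4096 := by decide
    rw [cnt32_toInt RC (by omega), e4096] at hbr_1068ea
    rw [di3_succ32 RC (by omega)] at w_mem
    have hun : ShadowUntouched v.mem s_10692e.mem := by v_untouched
    have hsame : Mem.SameExcept [⟨(e.reg .rsp).toNat - 128, (e.reg .rsp).toNat - 120⟩, ⟨F.pv + 20, F.pv + 24⟩]
        v.mem s_10692e.mem := by
      rw [w_mem]
      u_same
    have habi : (conv u₀).inv s_10692e := by
      refine ProgX.Base.abiInv_of ?_ ?_
      · rw [w_flags]
        simp only [X86.User.df_setStatus]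
        exact w_df_1068f8
      · rw [w_mxcsr]
        exact hmx
    refine ReachVia.done ?_
    apply di3_done hbody hlz hcodev hmu w_rip w_rsp (w_kept.get .r13 rfl) (w_kept.get .r14 rfl) (w_kept.get .r15 rfl)
      w_rax w_eq habi hun hsame
    · simp only [List.forall_mem_cons, List.not_mem_nil, false_imp_iff, implies_true, and_true]
      omega
    · right
      refine ⟨?_, by omega⟩
      rw [e_rc]
      simp only [gfield]
      rw [w_mem]
      rw [rd_writeLE_disjoint _ _ _ _ _ _ (by u_omega) (by omega) (by u_omega)]
      rw [rd_writeLE_same _ (v.reg .rbx + 20) 4 (RC + 1) _ (by u_omega) (by decide)]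
      have : (256 : Nat) ^ 4 = 4294967296 := by decide
      omega
    · left
      simp only [gfield]
      apply hsame.rd (F.pv + 24) 4 (by omega)
      simp only [List.forall_mem_cons, List.not_mem_nil, false_imp_iff, implies_true, and_true]
      omega
  · -- 0x106874 FROM 0x106938: `++RunningCode`, `RunningCode > MaxCode1`, and `RunningBits > 11` (l.1104 false)
    have e4096 : (4096#32).toInt = 4096 := by decide
    rw [cnt32_toInt RC (by omega), e4096] at hbr_1068ea
    rw [di3_succ32 RC (by omega)] at w_mem
    have hun : ShadowUntouched v.mem s_106938.mem := by v_untouched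
    have hsame : Mem.SameExcept [⟨(e.reg .rsp).toNat - 128, (e.reg .rsp).toNat - 120⟩, ⟨F.pv + 20, F.pv + 24⟩]
        v.mem s_106938.mem := by
      rw [w_mem]
      u_same
    have habi : (conv u₀).inv s_106938 := by
      refine ProgX.Base.abiInv_of ?_ ?_
      · rw [w_flags]
        simp only [X86.User.df_setStatus]
        exact w_df_1068f8
      · rw [w_mxcsr]
        exact hmx
    refine ReachVia.done ?_
    apply di3_done hbody hlz hcodev hmu w_rip w_rsp (w_kept.get .r13 rfl) (w_kept.get .r14 rfl) (w_kept.get .r15 rfl)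
      w_rax w_eq habi hun hsame
    · simp only [List.forall_mem_cons, List.not_mem_nil, false_imp_iff, implies_true, and_true]
      omega
    · right
      refine ⟨?_, by omega⟩
      rw [e_rc]
      simp only [gfield]
      rw [w_mem]
      rw [rd_writeLE_disjoint _ _ _ _ _ _ (by u_omega) (by omega) (by u_omega)]
      rw [rd_writeLE_same _ (v.reg .rbx + 20) 4 (RC + 1) _ (by u_omega) (by decide)]
      have : (256 : Nat) ^ 4 = 4294967296 := by decide
      omega
    · left
      simp only [gfield]
      apply hsame.rd (F.pv + 24) 4 (by omega)
      simp only [List.forall_mem_cons, List.not_mem_nil, false_imp_iff, implies_true, and_true]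
      omega
  · -- 0x106874 FROM 0x10691a: `++RunningCode`, `MaxCode1 <<= 1`, `++RunningBits` (l.1104 true: `RunningBits ≤ 11`)
    have e4096 : (4096#32).toInt = 4096 := by decide
    rw [cnt32_toInt RC (by omega), e4096] at hbr_1068ea
    have e11 : (11#32).toInt = 11 := by decide
    rw [part32_toInt_small b (by omega), e11] at hbr_106908
    rw [di3_succ32 RC (by omega), di3_inc32 b (by omega)] at w_mem
    obtain ⟨mv, hmvdef⟩ : ∃ mv : Nat, mv = (BitVec.ofNat 32 MC + BitVec.ofNat 32 MC).toNat := ⟨_, rfl⟩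
    rw [← hmvdef] at w_mem
    clear hmvdef
    have hun : ShadowUntouched v.mem s_10691a.mem := by v_untouched
    have hsame : Mem.SameExcept [⟨(e.reg .rsp).toNat - 128, (e.reg .rsp).toNat - 120⟩, ⟨F.pv + 20, F.pv + 32⟩]
        v.mem s_10691a.mem := by
      rw [w_mem]
      u_same
    have habi : (conv u₀).inv s_10691a := by
      refine ProgX.Base.abiInv_of ?_ ?_
      · rw [w_flags]
        simp only [X86.User.df_setStatus]
        exact w_df_1068f8
      · rw [w_mxcsr]
        exact hmx
    refine ReachVia.done ?_
    apply di3_done hbody hlz hcodev hmu w_rip w_rsp (w_kept.get .r13 rfl) (w_kept.get .r14 rfl) (w_kept.get .r15 rfl)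
      w_rax w_eq habi hun hsame
    · simp only [List.forall_mem_cons, List.not_mem_nil, false_imp_iff, implies_true, and_true]
      omega
    · right
      refine ⟨?_, by omega⟩
      rw [e_rc]
      simp only [gfield]
      rw [w_mem]
      rw [rd_writeLE_disjoint _ _ _ _ _ _ (by u_omega) (by omega) (by u_omega)]
      rw [rd_writeLE_disjoint _ _ _ _ _ _ (by u_omega) (by omega) (by u_omega)]
      rw [rd_writeLE_disjoint _ _ _ _ _ _ (by u_omega) (by omega) (by u_omega)]
      rw [rd_writeLE_same _ (v.reg .rbx + 20) 4 (RC + 1) _ (by u_omega) (by decide)]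
      have : (256 : Nat) ^ 4 = 4294967296 := by decide
      omega
    · right
      refine ⟨?_, by omega⟩
      rw [← h_rbp]
      simp only [gfield]
      rw [w_mem]
      rw [rd_writeLE_same _ (v.reg .rbx + 24) 4 (b.toNat + 1) _ (by u_omega) (by decide)]
      have : (256 : Nat) ^ 4 = 4294967296 := by decide
      omega

end Gif.Spec.DGifDecompressInput_3
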